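-- pv_equiv track=rewrite | github.com/Adeel0o0/php-learning | CodecademyChallenges.py | count_first_letter
-- ===== SOURCE A (Python) =====
-- def count_first_letter(names):
--   letters = {}
--   for key in names.keys():
--     first_letter = key[0]
--     if first_letter not in letters:
--       letters[first_letter] = 0
--     letters[first_letter] += len(names[key])
--   return letters
-- ===== SOURCE B (Python) =====
-- def count_first_letter(names):
--   # Pass 1: the distinct first letters in order of first appearance.
--   order = []
--   for key in names:
--     if key[0] not in order:
--       order.append(key[0])
--   # Pass 2: one summed entry per letter.
--   return {c: sum(len(v) for k, v in names.items() if k[0] == c) for c in order}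
-- ===== Notes on version B (the rewrite author's own statement) =====
-- stated objective: alternative
-- what changed: Instead of A's single pass that accumulates counts in a dict, B first collects the distinct first letters in order of first appearance and then builds each entry with one summation comprehension over the items per letter.
import Mathlib
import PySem

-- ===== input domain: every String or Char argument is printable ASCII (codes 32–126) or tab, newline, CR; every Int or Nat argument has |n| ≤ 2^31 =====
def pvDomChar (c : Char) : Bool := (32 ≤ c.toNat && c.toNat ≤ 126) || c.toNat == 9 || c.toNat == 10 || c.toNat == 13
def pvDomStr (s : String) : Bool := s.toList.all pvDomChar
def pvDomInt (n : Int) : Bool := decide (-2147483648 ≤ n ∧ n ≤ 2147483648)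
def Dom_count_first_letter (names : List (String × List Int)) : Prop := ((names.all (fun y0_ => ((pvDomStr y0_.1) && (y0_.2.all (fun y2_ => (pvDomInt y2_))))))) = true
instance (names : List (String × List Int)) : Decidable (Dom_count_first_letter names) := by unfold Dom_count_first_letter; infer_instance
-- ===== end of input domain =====

-- B is an alternative two-pass decomposition (distinct first letters first, then one sum per
-- letter) of A's single accumulating pass; same cost class, no speed claim.

-- ===== PORT A =====
-- The Python argument is a dict; PySem.Dict.ofList decodes the association list with Python's
-- dict-construction semantics (last value wins, first position kept), so iterating its items
-- with the paired value kv.2 is exactly 'for key in names.keys(): … len(names[key])'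
-- (dict keys are unique, so names[key] is the value paired with key).
def count_first_letter (names : List (String × List Int)) : List (String × Int) :=
  ((PySem.Dict.ofList names).items.foldl (fun letters kv =>
      match PySem.Str.pyGet? kv.1 0 with
      | none => letters   -- key[0] raises IndexError in Python; excluded by Pre_
      | some c =>
        let first := String.ofList [c]
        let letters1 := if letters.contains first then letters else letters.insert first 0
        letters1.insert first (letters1.getD first 0 + (kv.2.length : Int)))
    PySem.Dict.empty).items

-- ===== PORT B =====
def count_first_letter_alt (names : List (String × List Int)) : List (String × Int) :=
  let items := (PySem.Dict.ofList names).items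
  let order := items.foldl (fun order kv =>
      match PySem.Str.pyGet? kv.1 0 with
      | none => order   -- key[0] raises IndexError in Python; excluded by Pre_
      | some c =>
        let s := String.ofList [c]
        if order.contains s then order else order ++ [s]) []
  order.map (fun c => (c,
    items.foldl (fun acc kv =>
      if (match PySem.Str.pyGet? kv.1 0 with
          | none => false
          | some ch => String.ofList [ch] == c)
      then acc + (kv.2.length : Int) else acc) 0))

-- ===== PRECONDITION & SPEC =====
-- A (and B) raise IndexError on key[0] when the dict contains an empty-string key; exactly
-- those inputs are excluded.
def Pre_count_first_letter (names : List (String × List Int)) : Prop :=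
  ∀ kv ∈ names, kv.1 ≠ ""
instance (names : List (String × List Int)) : Decidable (Pre_count_first_letter names) := by unfold Pre_count_first_letter; infer_instance
def pvWitness_count_first_letter : (List (String × List Int)) := [("ada", [1, 2]), ("bob", []), ("amy", [3])]
def Spec_count_first_letter (names : List (String × List Int)) (out : List (String × Int)) : Prop := out = count_first_letter_alt names
instance (names : List (String × List Int)) (out : List (String × Int)) : Decidable (Spec_count_first_letter names out) := by unfold Spec_count_first_letter; infer_instance

-- ===== CLAIM (what is proved, stated in full; the proofs are below) =====
def Claim_equal_count_first_letter : Prop := ∀ (names : List (String × List Int)), Dom_count_first_letter names → Pre_count_first_letter names → Spec_count_first_letter names (count_first_letter names)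

-- ===== LEMMAS AND PROOFS =====

-- A's loop step (definitionally the port's fold body)
def pvAStep (letters : PySem.Dict String Int) (kv : String × List Int) : PySem.Dict String Int :=
  match PySem.Str.pyGet? kv.1 0 with
  | none => letters
  | some c =>
    let first := String.ofList [c]
    let letters1 := if letters.contains first then letters else letters.insert first 0
    letters1.insert first (letters1.getD first 0 + (kv.2.length : Int))

-- B's first pass (definitionally the port's fold body)
def pvOStep (order : List String) (kv : String × List Int) : List String :=
  match PySem.Str.pyGet? kv.1 0 with
  | none => order
  | some c =>
    let s := String.ofList [c]
    if order.contains s then order else order ++ [s]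

def pvOrder (l : List (String × List Int)) : List String := l.foldl pvOStep []

-- B's comprehension filter (definitionally the port's condition)
def pvHit (c : String) (kv : String × List Int) : Bool :=
  match PySem.Str.pyGet? kv.1 0 with
  | none => false
  | some ch => String.ofList [ch] == c

-- B's per-letter sum (definitionally the port's inner fold)
def pvTotal (l : List (String × List Int)) (c : String) : Int :=
  l.foldl (fun acc kv => if pvHit c kv then acc + (kv.2.length : Int) else acc) 0

lemma pvOrder_append (l : List (String × List Int)) (x : String × List Int) :
    pvOrder (l ++ [x]) = pvOStep (pvOrder l) x := by
  unfold pvOrder; rw [List.foldl_append]; rfl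

lemma pvTotal_append (l : List (String × List Int)) (x : String × List Int) (c : String) :
    pvTotal (l ++ [x]) c = pvTotal l c + (if pvHit c x then (x.2.length : Int) else 0) := by
  unfold pvTotal
  rw [List.foldl_append]
  simp only [List.foldl_cons, List.foldl_nil]
  by_cases h : pvHit c x <;> simp [h]

lemma pvTotal_eq_zero (l : List (String × List Int)) (c : String)
    (h : ∀ kv ∈ l, pvHit c kv = false) : pvTotal l c = 0 := by
  induction l with
  | nil => rfl
  | cons y ys ih =>
      have hy := h y (List.mem_cons_self)
      unfold pvTotal at *
      simp only [List.foldl_cons, hy, Bool.false_eq_true, if_false]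
      exact ih (fun kv hkv => h kv (List.mem_cons_of_mem _ hkv))

-- the main invariant, by snoc induction
lemma pvMain (l : List (String × List Int)) (h : ∀ kv ∈ l, PySem.Str.pyGet? kv.1 0 ≠ none) :
    (l.foldl pvAStep PySem.Dict.empty).items
        = (pvOrder l).map (fun c => (c, pvTotal l c))
    ∧ (pvOrder l).Nodup
    ∧ (∀ kv ∈ l, ∀ ch, PySem.Str.pyGet? kv.1 0 = some ch → String.ofList [ch] ∈ pvOrder l) := by
  induction l using List.reverseRecOn with
  | nil =>
      refine ⟨rfl, List.nodup_nil, ?_⟩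
      intro kv hkv; simp at hkv
  | append_singleton l x ih =>
      obtain ⟨ih1, ih2, ih3⟩ := ih (fun kv hkv => h kv (by simp [hkv]))
      have hx := h x (by simp)
      obtain ⟨c, hc⟩ : ∃ c, PySem.Str.pyGet? x.1 0 = some c := by
        cases hcase : PySem.Str.pyGet? x.1 0 with
        | none => exact absurd hcase hx
        | some c => exact ⟨c, rfl⟩
      have hhit : pvHit (String.ofList [c]) x = true := by
        unfold pvHit; rw [hc]; simp
      have hhit' : ∀ a : String, a ≠ String.ofList [c] → pvHit a x = false := by
        intro a ha; unfold pvHit; rw [hc]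
        simp only [beq_eq_false_iff_ne, ne_eq]
        exact fun h' => ha h'.symm
      have horder : pvOrder (l ++ [x]) =
          if (pvOrder l).contains (String.ofList [c]) then pvOrder l
          else pvOrder l ++ [String.ofList [c]] := by
        rw [pvOrder_append]; unfold pvOStep; rw [hc]
      have hstep : (l ++ [x]).foldl pvAStep PySem.Dict.empty
          = pvAStep (l.foldl pvAStep PySem.Dict.empty) x := by
        rw [List.foldl_append]; rfl
      set d := l.foldl pvAStep PySem.Dict.empty with hd
      have hkeys : d.keys = pvOrder l := by
        simp [PySem.Dict.keys, ih1, List.map_map, Function.comp_def]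
      have hnodupkeys : d.keys.Nodup := by rw [hkeys]; exact ih2
      by_cases hmem : String.ofList [c] ∈ pvOrder l
      · -- the letter is already present: overwrite in place
        have hcont : d.contains (String.ofList [c]) = true := by
          rw [PySem.Dict.contains_iff_mem_keys, hkeys]; exact hmem
        have hcontl : (pvOrder l).contains (String.ofList [c]) = true := by
          simpa using hmem
        have hgetD : d.getD (String.ofList [c]) 0 = pvTotal l (String.ofList [c]) := by
          have hmemitems : (String.ofList [c], pvTotal l (String.ofList [c])) ∈ d.items := by
            rw [ih1]; exact List.mem_map.2 ⟨String.ofList [c], hmem, rfl⟩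
          exact PySem.Dict.getD_of_mem_items d hmemitems hnodupkeys 0
        have hA : (l ++ [x]).foldl pvAStep PySem.Dict.empty
            = d.insert (String.ofList [c])
                (pvTotal l (String.ofList [c]) + (x.2.length : Int)) := by
          rw [hstep]; unfold pvAStep; rw [hc]; simp [hcont, hgetD]
        have horder' : pvOrder (l ++ [x]) = pvOrder l := by
          rw [horder, hcontl]; simp
        refine ⟨?_, by rw [horder']; exact ih2, ?_⟩
        · rw [hA, PySem.Dict.items_insert_of_contains d _ hcont, ih1, horder',
            List.map_map]
          apply List.map_congr_left
          intro a ha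
          rw [pvTotal_append]
          by_cases hac : a = String.ofList [c]
          · subst hac; simp [Function.comp, hhit]
          · simp [Function.comp, hac, hhit' a hac]
        · intro kv hkv ch hch
          rw [horder']
          rcases List.mem_append.1 hkv with hkv | hkv
          · exact ih3 kv hkv ch hch
          · simp only [List.mem_singleton] at hkv; subst hkv
            rw [hch] at hc; cases hc; exact hmem
      · -- a fresh letter: appended at the end with total = its own length
        have hcont : d.contains (String.ofList [c]) = false := by
          rw [← Bool.not_eq_true, PySem.Dict.contains_iff_mem_keys, hkeys]; exact hmem
        have hcontl : (pvOrder l).contains (String.ofList [c]) = false := by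
          simpa using hmem
        have horder' : pvOrder (l ++ [x]) = pvOrder l ++ [String.ofList [c]] := by
          rw [horder, hcontl]; simp
        have htot0 : pvTotal l (String.ofList [c]) = 0 := by
          refine pvTotal_eq_zero l _ (fun kv hkv => ?_)
          unfold pvHit
          cases hg : PySem.Str.pyGet? kv.1 0 with
          | none => rfl
          | some ch =>
              simp only [beq_eq_false_iff_ne, ne_eq]
              intro heq
              exact hmem (heq ▸ ih3 kv hkv ch hg)
        have hA : (l ++ [x]).foldl pvAStep PySem.Dict.empty
            = d.insert (String.ofList [c]) (0 + (x.2.length : Int)) := by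
          rw [hstep]; unfold pvAStep; rw [hc]
          simp [hcont, PySem.Dict.getD_insert_self, PySem.Dict.insert_insert_self]
        refine ⟨?_, ?_, ?_⟩
        · rw [hA, PySem.Dict.items_insert_of_not_contains d _ hcont, ih1, horder',
            List.map_append]
          congr 1
          · apply List.map_congr_left
            intro a ha
            rw [pvTotal_append]
            have hac : a ≠ String.ofList [c] := fun h' => hmem (h' ▸ ha)
            simp [hhit' a hac]
          · simp [pvTotal_append, hhit, htot0]
        · rw [horder']
          exact List.Nodup.append ih2 (List.nodup_singleton _)
            (by intro a ha hb; simp only [List.mem_singleton] at hb; subst hb; exact hmem ha)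
        · intro kv hkv ch hch
          rw [horder']
          rcases List.mem_append.1 hkv with hkv | hkv
          · exact List.mem_append_left _ (ih3 kv hkv ch hch)
          · simp only [List.mem_singleton] at hkv; subst hkv
            rw [hch] at hc; cases hc; simp
-- under Pre_, every key of the decoded dict is nonempty, so key[0] never raises
lemma pvPre_items (names : List (String × List Int)) (h : Pre_count_first_letter names) :
    ∀ kv ∈ (PySem.Dict.ofList names).items, PySem.Str.pyGet? kv.1 0 ≠ none := by
  intro kv hkv
  have hmemkeys : kv.1 ∈ (PySem.Dict.ofList names).keys :=
    PySem.Dict.mem_keys_of_mem_items _ hkv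
  have hkeys : (PySem.Dict.ofList names).keys
      = PySem.Set.update (PySem.Dict.empty (κ := String) (ν := List Int)).keys (names.map Prod.fst) :=
    PySem.Dict.keys_foldl_insert_key names Prod.fst (fun _ p => p.2) PySem.Dict.empty
  rw [hkeys] at hmemkeys
  have hmem : kv.1 ∈ names.map Prod.fst := by
    rw [PySem.Dict.keys_empty, PySem.Set.update_nil_left, PySem.Set.mem_ofList] at hmemkeys
    exact hmemkeys
  obtain ⟨p, hp, hp1⟩ := List.mem_map.1 hmem
  have hne : p.1 ≠ "" := h p hp
  rw [← hp1]
  cases hl : p.1.toList with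
  | nil => exact absurd (String.toList_injective (by simp [hl])) hne
  | cons a as =>
      have hg : PySem.Str.pyGet? p.1 0 = some a := by
        simp [PySem.Str.pyGet?, PySem.List.pyGet?, PySem.List.pyIdx?, hl]
      rw [hg]; simp

-- ===== VERDICT (by name: the statement is the Claim_ definition above) =====
theorem count_first_letter_spec : Claim_equal_count_first_letter := by
  intro names _ hpre
  unfold Spec_count_first_letter count_first_letter count_first_letter_alt
  have h := pvMain ((PySem.Dict.ofList names).items) (pvPre_items names hpre)
  exact h.1
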